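-- pv_equiv track=rewrite | github.com/kellerja/ProgAlg-ITI0140 | EX12/EX12.py | pair_frequency
-- ===== SOURCE A (Python) =====
-- def pair_frequency(word_list):
--     """Make a list of words into a dictionary with letter pairs and the number of the pair's instances."""
--     line = ' '.join(word_list)
--     correct = 'ABCDEFGHIJKLMNOPQRSŠZŽTUVWÕÄÖÜXY'
--     letter_pairs = {}
--     for i in range(len(line) - 1):
--         pair = line[i:i + 2].upper()
--         if pair in letter_pairs:
--             letter_pairs[pair] += 1
--         elif pair[0] in correct and pair[1] in correct:
--             letter_pairs[pair] = 1
--     return letter_pairs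
-- ===== SOURCE B (Python) =====
-- def pair_frequency(word_list):
--     """Make a list of words into a dictionary with letter pairs and the number of the pair's instances."""
--     correct = 'ABCDEFGHIJKLMNOPQRSŠZŽTUVWÕÄÖÜXY'
--     letter_pairs = {}
--     for word in word_list:
--         w = word.upper()
--         for a, b in zip(w, w[1:]):
--             if a in correct and b in correct:
--                 pair = a + b
--                 letter_pairs[pair] = letter_pairs.get(pair, 0) + 1
--     return letter_pairs
-- ===== Notes on version B (the rewrite author's own statement) =====
-- stated objective: simpler
-- what changed: B iterates over each word and its adjacent character pairs (zip(w, w[1:])) with a get-or-0 counter update, instead of joining all words into one spaced string and index-scanning it with slices and a contains/modify branch; cross-word pairs simply never arise instead of being filtered by the alphabet test.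
import Mathlib
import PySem

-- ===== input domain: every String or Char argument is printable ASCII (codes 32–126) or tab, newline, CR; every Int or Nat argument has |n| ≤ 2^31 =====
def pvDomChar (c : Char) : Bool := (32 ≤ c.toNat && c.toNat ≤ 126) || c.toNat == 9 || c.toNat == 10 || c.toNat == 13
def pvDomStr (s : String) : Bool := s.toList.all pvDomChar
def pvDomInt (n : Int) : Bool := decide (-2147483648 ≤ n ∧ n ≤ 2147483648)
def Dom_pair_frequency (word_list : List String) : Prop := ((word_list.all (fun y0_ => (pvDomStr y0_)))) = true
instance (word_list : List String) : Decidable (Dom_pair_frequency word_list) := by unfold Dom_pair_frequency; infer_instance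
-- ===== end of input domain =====

-- B iterates per word over adjacent character pairs instead of index-scanning the joined string;
-- objective: simpler (no joined string, no index arithmetic, one uppercase per word).

-- the alphabet constant 'correct' (membership of a one-character string in Python is
-- exactly membership of its character in this list)
def pvCorrect : List Char := "ABCDEFGHIJKLMNOPQRSŠZŽTUVWÕÄÖÜXY".toList

-- ===== PORT A =====
-- loop body: pair = ln[i:i+2].upper(); dict update as in A
def pvStepA (ln : List Char) (d : PySem.Dict String Int) (i : Int) : PySem.Dict String Int :=
  let pair := PySem.Chars.upper (PySem.List.slice ln (some i) (some (i + 2)))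
  if d.contains (String.ofList pair) then
    d.modify (String.ofList pair) 0 (· + 1)          -- letter_pairs[pair] += 1
  else
    -- pair[0] / pair[1]: inside the loop the slice always has two characters
    match PySem.List.pyGet? pair 0, PySem.List.pyGet? pair 1 with
    | some a, some b =>
        if a ∈ pvCorrect ∧ b ∈ pvCorrect then d.insert (String.ofList pair) 1 else d
    | _, _ => d

def pair_frequency (word_list : List String) : List (String × Int) :=
  let ln := (PySem.Str.join " " word_list).toList
  ((PySem.List.pyRange 0 (PySem.List.len ln - 1)).foldl (pvStepA ln) PySem.Dict.empty).items

-- ===== PORT B =====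
-- loop body of B: for (a, b) in zip(w, w[1:]) with w already uppercased
def pvStepB (d : PySem.Dict String Int) (p : Char × Char) : PySem.Dict String Int :=
  if p.1 ∈ pvCorrect ∧ p.2 ∈ pvCorrect then
    let pair := String.ofList [p.1, p.2]
    d.insert pair (d.getD pair 0 + 1)                -- freq[pair] = freq.get(pair, 0) + 1
  else d

def pair_frequency_alt (word_list : List String) : List (String × Int) :=
  (word_list.foldl (fun d word =>
      let w := PySem.Chars.upper word.toList
      (w.zip (PySem.List.slice w (some 1) none)).foldl pvStepB d)
    PySem.Dict.empty).items

-- ===== PRECONDITION & SPEC =====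
def Spec_pair_frequency (word_list : List String) (out : List (String × Int)) : Prop := out = pair_frequency_alt word_list
instance (word_list : List String) (out : List (String × Int)) : Decidable (Spec_pair_frequency word_list out) := by unfold Spec_pair_frequency; infer_instance

-- ===== CLAIM (what is proved, stated in full; the proofs are below) =====
def Claim_equal_pair_frequency : Prop := ∀ (word_list : List String), Dom_pair_frequency word_list → Spec_pair_frequency word_list (pair_frequency word_list)

-- ===== LEMMAS AND PROOFS =====

-- fold over adjacent pairs, stepping with the UPPERCASED characters (common core of both ports)
def pvPFU (d : PySem.Dict String Int) : List Char → PySem.Dict String Int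
  | a :: b :: rest =>
      pvPFU (pvStepB d (PySem.Chars.upperChar a, PySem.Chars.upperChar b)) (b :: rest)
  | _ => d

theorem pvPFU_nil (d : PySem.Dict String Int) : pvPFU d [] = d := rfl
theorem pvPFU_single (d : PySem.Dict String Int) (a : Char) : pvPFU d [a] = d := rfl
theorem pvPFU_cons₂ (d : PySem.Dict String Int) (a b : Char) (r : List Char) :
    pvPFU d (a :: b :: r)
      = pvPFU (pvStepB d (PySem.Chars.upperChar a, PySem.Chars.upperChar b)) (b :: r) := rfl

-- B's inner zip-fold over an uppercased word is pvPFU over the original word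
theorem pvB_zip_eq (w : List Char) (d : PySem.Dict String Int) :
    ((PySem.Chars.upper w).zip
        (PySem.List.slice (PySem.Chars.upper w) (some 1) none)).foldl pvStepB d
      = pvPFU d w := by
  rw [PySem.List.slice_from_one]
  induction w generalizing d with
  | nil => rfl
  | cons a t ih =>
      cases t with
      | nil => rfl
      | cons b r =>
          simp only [PySem.Chars.upper, List.map_cons, List.tail_cons, List.zip_cons_cons,
            List.foldl_cons, pvPFU_cons₂]
          exact ih _

-- a pair containing the space character never counts
theorem pvStepB_space_right (d : PySem.Dict String Int) (c : Char) :
    pvStepB d (c, PySem.Chars.upperChar ' ') = d := by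
  have h : PySem.Chars.upperChar ' ' ∉ pvCorrect := by decide
  simp [pvStepB, h]
theorem pvStepB_space_left (d : PySem.Dict String Int) (c : Char) :
    pvStepB d (PySem.Chars.upperChar ' ', c) = d := by
  have h : PySem.Chars.upperChar ' ' ∉ pvCorrect := by decide
  simp [pvStepB, h]

theorem pvPFU_space_cons (d : PySem.Dict String Int) (ys : List Char) :
    pvPFU d (' ' :: ys) = pvPFU d ys := by
  cases ys with
  | nil => rfl
  | cons y r => rw [pvPFU_cons₂, pvStepB_space_left]

theorem pvPFU_append_space (xs ys : List Char) (d : PySem.Dict String Int) :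
    pvPFU d (xs ++ ' ' :: ys) = pvPFU (pvPFU d xs) ys := by
  induction xs generalizing d with
  | nil => simpa using pvPFU_space_cons d ys
  | cons a t ih =>
      cases t with
      | nil =>
          rw [List.cons_append, List.nil_append, pvPFU_cons₂, pvStepB_space_right,
            pvPFU_space_cons, pvPFU_single]
      | cons b r =>
          rw [List.cons_append, List.cons_append, pvPFU_cons₂, ← List.cons_append,
            ih, pvPFU_cons₂]

-- scanning the space-joined list of words = folding pvPFU word by word
theorem pvPFU_join (css : List (List Char)) (d : PySem.Dict String Int) :
    pvPFU d (PySem.Chars.join [' '] css) = css.foldl pvPFU d := by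
  induction css generalizing d with
  | nil => rfl
  | cons cs rest ih =>
      cases rest with
      | nil => rw [PySem.Chars.join_singleton]; rfl
      | cons cs' rest' =>
          rw [PySem.Chars.join_cons_cons, List.foldl_cons, ← ih,
            List.append_assoc, List.singleton_append, pvPFU_append_space]

-- invariant: every character of every key of the dictionary is in the alphabet
def pvInv (d : PySem.Dict String Int) : Prop :=
  ∀ k ∈ d.keys, ∀ c ∈ k.toList, c ∈ pvCorrect

theorem pvInv_step (d : PySem.Dict String Int) (p : Char × Char) (h : pvInv d) :
    pvInv (pvStepB d p) := by
  unfold pvStepB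
  split
  · rename_i hc
    intro k hk c hcmem
    rcases (PySem.Dict.mem_keys_insert _ _ _ _).1 hk with rfl | hk'
    · rw [String.toList_ofList] at hcmem
      simp only [List.mem_cons, List.not_mem_nil, or_false] at hcmem
      rcases hcmem with rfl | rfl
      · exact hc.1
      · exact hc.2
    · exact h k hk' c hcmem
  · exact h

-- A's loop body equals B's step, given the invariant and two characters in range
theorem pvStepA_eq (ln : List Char) (j : Nat) (hj0 : j < ln.length) (hj : j + 1 < ln.length)
    (d : PySem.Dict String Int) (h : pvInv d) :
    pvStepA ln d (j : Int)
      = pvStepB d (PySem.Chars.upperChar (ln[j]'hj0), PySem.Chars.upperChar (ln[j + 1]'hj)) := by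
  have hslice : PySem.List.slice ln (some (j : Int)) (some ((j : Int) + 2))
      = [ln[j]'hj0, ln[j + 1]'hj] := by
    have h2 : ((j : Int) + 2) = ((j : Int) + ((2 : Nat) : Int)) := by omega
    rw [h2, PySem.List.slice_natCast_add]
    rw [List.drop_eq_getElem_cons (show j < ln.length by omega)]
    rw [List.drop_eq_getElem_cons (show j + 1 < ln.length from hj)]
    rfl
  unfold pvStepA
  rw [hslice]
  simp only [PySem.Chars.upper, List.map_cons, List.map_nil]
  set a := PySem.Chars.upperChar (ln[j]'hj0) with ha
  set b := PySem.Chars.upperChar (ln[j + 1]'hj) with hb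
  by_cases hc : d.contains (String.ofList [a, b])
  · -- present: A's modify = insert (getD + 1); B's guard holds by the invariant
    have hmem : String.ofList [a, b] ∈ d.keys := (PySem.Dict.contains_iff_mem_keys _ _).1 hc
    have hab : a ∈ pvCorrect ∧ b ∈ pvCorrect := by
      have := h _ hmem
      rw [String.toList_ofList] at this
      exact ⟨this a (by simp), this b (by simp)⟩
    simp [hc, pvStepB, hab, PySem.Dict.modify]
  · -- absent: A inserts 1; B inserts getD + 1 = 0 + 1
    have hcf : d.contains (String.ofList [a, b]) = false := by simpa using hc
    have hg : d.getD (String.ofList [a, b]) 0 = 0 :=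
      PySem.Dict.getD_of_not_contains d 0 hcf
    simp [pvStepB, hcf, hg, PySem.List.pyGet?, PySem.List.pyIdx?]

-- A's index loop from position j equals pvPFU on the suffix from j
theorem pvA_range_eq (ln : List Char) (m j : Nat) (hm : ln.length - j = m)
    (d : PySem.Dict String Int) (h : pvInv d) :
    (PySem.List.pyRange (j : Int) ((ln.length : Int) - 1)).foldl (pvStepA ln) d
      = pvPFU d (ln.drop j) := by
  induction m generalizing j d with
  | zero =>
      have hj : ln.length ≤ j := by omega
      rw [PySem.List.pyRange_one_eq_nil (by omega), List.foldl_nil,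
        List.drop_of_length_le hj, pvPFU_nil]
  | succ m ih =>
      by_cases hlt : j + 1 < ln.length
      · rw [PySem.List.pyRange_one_cons (by omega), List.foldl_cons,
          pvStepA_eq ln j (by omega) hlt d h,
          List.drop_eq_getElem_cons (by omega : j < ln.length),
          List.drop_eq_getElem_cons (by omega : j + 1 < ln.length), pvPFU_cons₂,
          ← List.drop_eq_getElem_cons hlt]
        have hcast : ((j : Int) + 1) = (((j + 1 : Nat)) : Int) := by omega
        rw [hcast]
        exact ih (j + 1) (by omega) _ (pvInv_step d _ h)
      · rw [PySem.List.pyRange_one_eq_nil (by omega), List.foldl_nil]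
        rcases hd : ln.drop j with _ | ⟨c, t⟩
        · rfl
        · have : t = [] := by
            have := congrArg List.length hd
            simp [List.length_drop] at this
            cases t with
            | nil => rfl
            | cons _ _ => simp at this; omega
          rw [this, pvPFU_single]

theorem pvInv_empty : pvInv PySem.Dict.empty := by
  intro k hk
  simp [PySem.Dict.keys_empty] at hk

-- ===== VERDICT (by name: the statement is the Claim_ definition above) =====
theorem pair_frequency_spec : Claim_equal_pair_frequency := by
  intro word_list _
  have hline : (PySem.Str.join " " word_list).toList
      = PySem.Chars.join [' '] (word_list.map String.toList) := by
    rw [PySem.Str.toList_join]; rfl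
  simp only [Spec_pair_frequency, pair_frequency, pair_frequency_alt, hline, PySem.List.len_eq]
  have h0 := pvA_range_eq (PySem.Chars.join [' '] (word_list.map String.toList))
    (PySem.Chars.join [' '] (word_list.map String.toList)).length 0 rfl
    PySem.Dict.empty pvInv_empty
  simp only [Nat.cast_zero, List.drop_zero] at h0
  rw [h0, pvPFU_join, List.foldl_map]
  simp only [pvB_zip_eq]
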